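-- pv_equiv track=rewrite | github.com/fabaff/forbidden | src/forbidden/forbidden.py | get_recursive_paths
-- ===== SOURCE A (Python) =====
-- path_const = "/"
--
-- def get_recursive_paths(path):
-- 	end_no_const = ""
-- 	end_const = path_const
-- 	tmp = [end_no_const, end_const]
-- 	for entry in path.strip(path_const).split(path_const):
-- 		end_no_const += path_const + entry
-- 		end_const += entry + path_const
-- 		tmp.extend([end_no_const, end_const])
-- 	return unique(tmp)
--
-- def unique(sequence):
-- 	seen = set()
-- 	return [x for x in sequence if not (x in seen or seen.add(x))]
-- ===== SOURCE B (Python) =====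
-- path_const = "/"
--
-- def get_recursive_paths(path):
--     parts = path.strip(path_const).split(path_const)
--     result = ["", path_const]
--     for i in range(len(parts)):
--         prefix = path_const.join(parts[:i + 1])
--         result.append(path_const + prefix)
--         result.append(path_const + prefix + path_const)
--     return list(dict.fromkeys(result))
-- ===== Notes on version B (the rewrite author's own statement) =====
-- stated objective: alternative
-- what changed: B recomputes each cumulative prefix directly by joining a slice parts[:i+1] of the segment list over an index range and deduplicates with dict.fromkeys, replacing A's two incrementally mutated string accumulators and its seen-set filter helper.
import Mathlib
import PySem

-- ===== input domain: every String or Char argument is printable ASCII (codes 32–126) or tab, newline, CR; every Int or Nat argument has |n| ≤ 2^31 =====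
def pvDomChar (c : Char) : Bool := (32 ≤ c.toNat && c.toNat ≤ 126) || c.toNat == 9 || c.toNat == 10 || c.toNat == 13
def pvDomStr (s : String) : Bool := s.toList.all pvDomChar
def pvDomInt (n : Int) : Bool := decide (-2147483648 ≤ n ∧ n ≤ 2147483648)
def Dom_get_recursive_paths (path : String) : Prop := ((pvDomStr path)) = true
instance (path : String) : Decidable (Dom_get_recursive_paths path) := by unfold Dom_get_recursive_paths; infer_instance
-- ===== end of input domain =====

-- B recomputes each prefix directly by joining a slice of the segment list and dedups via
-- dict.fromkeys, instead of A's two incrementally mutated string accumulators + seen-set filter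
-- (objective: alternative decomposition, same cost).

-- ===== PORT A =====
-- helper 'unique': seen-set comprehension keeping first occurrences
def pyUnique (seq : List String) : List String :=
  (seq.foldl
    (fun (st : PySem.Set String × List String) x =>
      if st.1.contains x then st else (PySem.Set.add st.1 x, st.2 ++ [x]))
    (PySem.Set.empty, [])).2

-- path.strip("/").split("/"); the separator is the literal "/" ≠ "", so split? is always `some`
def pySplitSlash (path : String) : List String :=
  (PySem.Str.split? (PySem.Str.stripChars path "/") "/").getD []

def get_recursive_paths (path : String) : List String :=
  let st := (pySplitSlash path).foldl
    (fun (st : String × String × List String) entry =>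
      let enc := st.1 ++ "/" ++ entry
      let ec := st.2.1 ++ entry ++ "/"
      (enc, ec, st.2.2 ++ [enc, ec]))
    ("", "/", ["", "/"])
  pyUnique st.2.2

-- ===== PORT B =====
def get_recursive_paths_alt (path : String) : List String :=
  let parts := (PySem.Str.split? (PySem.Str.stripChars path "/") "/").getD []
  let result := (PySem.List.pyRange 0 (parts.length : Int) 1).foldl
    (fun acc i =>
      let pre := PySem.Str.join "/" (PySem.List.slice parts none (some (i + 1)))
      acc ++ ["/" ++ pre, "/" ++ pre ++ "/"])
    ["", "/"]
  (result.foldl (fun (d : PySem.Dict String Unit) x => d.insert x ()) PySem.Dict.empty).keys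

-- ===== PRECONDITION & SPEC =====
def Spec_get_recursive_paths (path : String) (out : List String) : Prop := out = get_recursive_paths_alt path
instance (path : String) (out : List String) : Decidable (Spec_get_recursive_paths path out) := by unfold Spec_get_recursive_paths; infer_instance

-- ===== CLAIM (what is proved, stated in full; the proofs are below) =====
def Claim_equal_get_recursive_paths : Prop := ∀ (path : String), Dom_get_recursive_paths path → Spec_get_recursive_paths path (get_recursive_paths path)

-- ===== LEMMAS AND PROOFS =====

-- the stream of path strings emitted by A's loop, starting from accumulator e
def emitA (e : String) : List String → List String
  | [] => []
  | x :: xs => (e ++ "/" ++ x) :: ((e ++ "/" ++ x) ++ "/") :: emitA (e ++ "/" ++ x) xs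

-- A's no-const accumulator after consuming the segments p: '' if p = [], else '/' + '/'.join(p)
def jn (p : List String) : String :=
  if p = [] then "" else "/" ++ PySem.Str.join "/" p

theorem chars_join_snoc (sep x : List Char) : ∀ (qs : List (List Char)) (q : List Char),
    PySem.Chars.join sep ((q :: qs) ++ [x]) = PySem.Chars.join sep (q :: qs) ++ sep ++ x := by
  intro qs
  induction qs with
  | nil => intro q; simp [PySem.Chars.join_cons_cons, PySem.Chars.join_singleton]
  | cons r rs ih =>
    intro q
    have h := ih r
    simp only [List.cons_append] at *
    rw [PySem.Chars.join_cons_cons, PySem.Chars.join_cons_cons, h]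
    simp

theorem str_join_snoc (qs : List String) (q x : String) :
    PySem.Str.join "/" ((q :: qs) ++ [x]) = PySem.Str.join "/" (q :: qs) ++ "/" ++ x := by
  unfold PySem.Str.join
  rw [List.map_append, List.map_singleton]
  rw [show (List.map String.toList (q :: qs)) ++ [x.toList] = (q.toList :: List.map String.toList qs) ++ [x.toList] by simp]
  rw [chars_join_snoc]
  rw [String.ofList_append, String.ofList_append, String.ofList_toList]
  simp [String.ofList_toList]

theorem jn_snoc (p : List String) (x : String) : jn (p ++ [x]) = jn p ++ "/" ++ x := by
  cases p with
  | nil =>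
    simp only [List.nil_append, jn, if_neg (by simp : ¬([x] : List String) = [])]
    unfold PySem.Str.join
    simp [PySem.Chars.join_singleton, String.ofList_toList]
  | cons q qs =>
    simp only [jn, List.cons_append, if_neg (by simp : ¬(q :: (qs ++ [x])) = []),
      if_neg (by simp : ¬(q :: qs) = [])]
    rw [show (q :: (qs ++ [x])) = (q :: qs) ++ [x] by simp]
    rw [str_join_snoc]
    simp [String.append_assoc]

-- A's loop: full-state characterisation
theorem foldA_eq (l : List String) : ∀ (e : String) (acc : List String),
    l.foldl
      (fun (st : String × String × List String) entry =>
        (st.1 ++ "/" ++ entry, st.2.1 ++ entry ++ "/",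
         st.2.2 ++ [st.1 ++ "/" ++ entry, st.2.1 ++ entry ++ "/"]))
      (e, e ++ "/", acc)
    = (l.foldl (fun e x => e ++ "/" ++ x) e,
       l.foldl (fun e x => e ++ "/" ++ x) e ++ "/",
       acc ++ emitA e l) := by
  induction l with
  | nil => intro e acc; simp [emitA]
  | cons x xs ih =>
    intro e acc
    simp only [List.foldl_cons]
    rw [ih (e ++ "/" ++ x) (acc ++ [e ++ "/" ++ x, (e ++ "/" ++ x) ++ "/"])]
    simp [emitA]

-- B's per-index emissions ARE A's stream
theorem emitA_eq_flatMap (l : List String) : ∀ (p : List String),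
    emitA (jn p) l
    = (List.range l.length).flatMap
        (fun k => ["/" ++ PySem.Str.join "/" (p ++ l.take (k + 1)),
                   "/" ++ PySem.Str.join "/" (p ++ l.take (k + 1)) ++ "/"]) := by
  induction l with
  | nil => intro p; simp [emitA]
  | cons x xs ih =>
    intro p
    have hx : "/" ++ PySem.Str.join "/" (p ++ [x]) = jn p ++ "/" ++ x := by
      rw [← jn_snoc]
      unfold jn
      rw [if_neg (by simp)]
    simp only [emitA, List.length_cons, List.range_succ_eq_map, List.flatMap_cons,
      List.flatMap_map, List.take_succ_cons, List.take_zero]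
    rw [hx]
    congr 1
    congr 1
    rw [← jn_snoc]
    rw [ih (p ++ [x])]
    congr 1
    funext a
    simp only [Nat.succ_eq_add_one, List.append_assoc, List.singleton_append]

-- A's unique = Set.ofList
theorem pyUnique_eq_ofList (xs : List String) : pyUnique xs = PySem.Set.ofList xs := by
  have h : ∀ (l : List String) (s : PySem.Set String),
      l.foldl
        (fun (st : PySem.Set String × List String) x =>
          if st.1.contains x then st else (PySem.Set.add st.1 x, st.2 ++ [x]))
        (s, (s : List String))
      = (l.foldl PySem.Set.add s, l.foldl PySem.Set.add s) := by
    intro l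
    induction l with
    | nil => intro s; simp
    | cons x xs ih =>
      intro s
      simp only [List.foldl_cons]
      by_cases hm : x ∈ s
      · have hc : PySem.Set.contains s x = true := (PySem.Set.contains_iff s x).mpr hm
        rw [if_pos hc, show PySem.Set.add s x = s from PySem.Set.add_of_mem hm] at *
        exact ih s
      · have hc : PySem.Set.contains s x = false := by
          rw [← Bool.not_eq_true, PySem.Set.contains_iff]; exact hm
        rw [if_neg (fun h => hm ((PySem.Set.contains_iff s x).mp h)), show PySem.Set.add s x = s ++ [x] from PySem.Set.add_of_not_mem hm]
        exact ih (s ++ [x])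
  have h0 := h xs PySem.Set.empty
  unfold pyUnique
  rw [show (PySem.Set.empty, ([] : List String)) = ((PySem.Set.empty : PySem.Set String), (PySem.Set.empty : List String)) from rfl]
  rw [h0, PySem.Set.ofList_eq_foldl]
  rfl

-- ===== VERDICT (by name: the statement is the Claim_ definition above) =====
theorem get_recursive_paths_spec : Claim_equal_get_recursive_paths := by
  intro path _
  unfold Spec_get_recursive_paths get_recursive_paths get_recursive_paths_alt pySplitSlash
  dsimp only
  generalize (PySem.Str.split? (PySem.Str.stripChars path "/") "/").getD [] = parts
  -- A side
  have hA := foldA_eq parts "" ["", "/"]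
  rw [show ("" : String) ++ "/" = "/" from rfl] at hA
  rw [hA]
  dsimp only
  rw [pyUnique_eq_ofList]
  -- B side
  have hfun : ∀ k : Nat, PySem.List.slice parts none (some ((0 : Int) + ↑k + 1)) = parts.take (k + 1) := by
    intro k
    rw [PySem.List.slice_to parts (b := (0 : Int) + ↑k + 1) (by omega)]
    congr 1
    omega
  have hflat := emitA_eq_flatMap parts []
  rw [show jn ([] : List String) = "" from by simp [jn]] at hflat
  simp only [List.nil_append] at hflat
  rw [PySem.List.pyRange_one]
  simp only [Int.sub_zero, Int.toNat_natCast, List.foldl_map, hfun]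
  rw [PySem.List.foldl_append_eq_flatMap
    (fun k => ["/" ++ PySem.Str.join "/" (parts.take (k + 1)),
               "/" ++ PySem.Str.join "/" (parts.take (k + 1)) ++ "/"])]
  rw [← hflat]
  rw [PySem.Dict.keys_foldl_insert _ (fun _ _ => ()) PySem.Dict.empty]
  rw [show (PySem.Dict.empty : PySem.Dict String Unit).keys = [] from rfl]
  rw [PySem.Set.update_nil_left]
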